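-- pv_equiv track=rewrite | github.com/LearnerMans/RAG | utils/utils.py | process_duplicates
-- ===== SOURCE A (Python) =====
-- def process_duplicates(strings):
--     """
--     Remove duplicates from a list of strings and return the duplicate items.
--
--     Args:
--         strings (list): List of strings to process
--
--     Returns:
--         tuple: (list of unique strings, list of duplicate strings)
--     """
--     seen = set()
--     duplicates = set()
--
--     # Find duplicates while preserving order
--     result = []
--     for item in strings:
--         if item in seen:
--             duplicates.add(item)
--         else:
--             result.append(item)
--             seen.add(item)
--
--     return result, sorted(list(duplicates))
-- ===== SOURCE B (Python) =====
-- def process_duplicates(strings):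
--     """
--     Remove duplicates from a list of strings and return the duplicate items.
--
--     Sorting-based: uniques are the ordered first occurrences; duplicates are
--     detected by sorting the input, where equal items become adjacent, so the
--     repeated values are exactly the deduped right halves of adjacent equal pairs
--     (already in sorted order, no final sort needed).
--     """
--     unique = list(dict.fromkeys(strings))
--     s = sorted(strings)
--     dups = list(dict.fromkeys(y for x, y in zip(s, s[1:]) if x == y))
--     return unique, dups
-- ===== Notes on version B (the rewrite author's own statement) =====
-- stated objective: alternative
-- what changed: A makes one hash-set pass branching per item to maintain seen/duplicate sets and then sorts the duplicate set; B never tests set membership: it takes the ordered dedup of the input for the uniques and detects duplicates by sorting the input and collecting the adjacent equal pairs, which yields the duplicate values already in sorted order.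
import Mathlib
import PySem

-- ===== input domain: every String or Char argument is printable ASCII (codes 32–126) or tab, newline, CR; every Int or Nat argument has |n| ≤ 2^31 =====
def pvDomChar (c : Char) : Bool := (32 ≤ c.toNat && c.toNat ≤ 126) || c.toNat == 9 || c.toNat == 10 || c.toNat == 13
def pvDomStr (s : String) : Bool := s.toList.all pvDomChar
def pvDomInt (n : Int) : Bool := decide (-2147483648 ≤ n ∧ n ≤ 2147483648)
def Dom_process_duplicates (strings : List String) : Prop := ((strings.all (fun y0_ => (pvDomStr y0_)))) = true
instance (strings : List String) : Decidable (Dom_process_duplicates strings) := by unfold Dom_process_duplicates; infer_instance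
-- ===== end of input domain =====

-- B replaces A's hash-set membership pass by a sorting-based scheme: dedup for the uniques, and the duplicates read off the adjacent equal pairs of the sorted input (alternative algorithm, same task).

-- ===== PORT A =====
-- A's loop step: branch per item on membership in `seen`, maintaining the state (seen, duplicates, result)

def pdStepA (acc : PySem.Set String × PySem.Set String × List String) (item : String) :
    PySem.Set String × PySem.Set String × List String :=
  if PySem.Set.contains acc.1 item then (acc.1, PySem.Set.add acc.2.1 item, acc.2.2)
  else (PySem.Set.add acc.1 item, acc.2.1, acc.2.2 ++ [item])

def process_duplicates (strings : List String) : List String × List String :=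
  let st := strings.foldl pdStepA (PySem.Set.empty, PySem.Set.empty, [])
  (st.2.2, PySem.List.sorted st.2.1 (fun x => x) false)

-- ===== PORT B =====
def process_duplicates_alt (strings : List String) : List String × List String :=
  let unique := PySem.List.dedup strings
  let s := PySem.List.sorted strings (fun x => x) false
  let dups := PySem.List.dedup (((s.zip (s.drop 1)).filter (fun p => p.1 == p.2)).map Prod.snd)
  (unique, dups)

-- ===== PRECONDITION & SPEC =====
def Spec_process_duplicates (strings : List String) (out : List String × List String) : Prop := out = process_duplicates_alt strings
instance (strings : List String) (out : List String × List String) : Decidable (Spec_process_duplicates strings out) := by unfold Spec_process_duplicates; infer_instance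

-- ===== CLAIM (what is proved, stated in full; the proofs are below) =====
def Claim_equal_process_duplicates : Prop := ∀ (strings : List String), Dom_process_duplicates strings → Spec_process_duplicates strings (process_duplicates strings)

-- ===== LEMMAS AND PROOFS =====
theorem pdStepA_mem (acc : PySem.Set String × PySem.Set String × List String) (a : String)
    (h : a ∈ acc.1) : pdStepA acc a = (acc.1, PySem.Set.add acc.2.1 a, acc.2.2) := by
  simp [pdStepA, h]

theorem pdStepA_not_mem (acc : PySem.Set String × PySem.Set String × List String) (a : String)
    (h : a ∉ acc.1) : pdStepA acc a = (PySem.Set.add acc.1 a, acc.2.1, acc.2.2 ++ [a]) := by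
  simp [pdStepA, h]

theorem pdFold_dups_mem (xs : List String) (seen dups : PySem.Set String) (res : List String)
    (x : String) :
    x ∈ (xs.foldl pdStepA (seen, dups, res)).2.1 ↔
      x ∈ dups ∨ (x ∈ xs ∧ (x ∈ seen ∨ 2 ≤ xs.count x)) := by
  induction xs generalizing seen dups res with
  | nil => simp
  | cons a t ih =>
    rw [List.foldl_cons]
    by_cases h : a ∈ seen
    · rw [pdStepA_mem _ _ h, ih]
      by_cases hx : x = a
      · subst hx
        simp only [PySem.Set.mem_add, List.mem_cons, true_or, true_and]
        constructor
        · rintro ((hd | _) | _)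
          · exact Or.inl hd
          · exact Or.inr (Or.inl h)
          · exact Or.inr (Or.inl h)
        · rintro (hd | _)
          · exact Or.inl (Or.inl hd)
          · exact Or.inl (Or.inr trivial)
      · have hcnt : (a :: t).count x = t.count x := by simp [Ne.symm hx]
        rw [PySem.Set.mem_add, hcnt]
        simp only [List.mem_cons, hx, false_or, or_false]
    · rw [pdStepA_not_mem _ _ h, ih]
      by_cases hx : x = a
      · subst hx
        have hcnt : (x :: t).count x = t.count x + 1 := by simp
        rw [hcnt]
        constructor
        · rintro (hd | ⟨hm, _⟩)
          · exact Or.inl hd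
          · refine Or.inr ⟨List.mem_cons_self, Or.inr ?_⟩
            have := List.count_pos_iff.mpr hm; omega
        · rintro (hd | ⟨_, hs | hs⟩)
          · exact Or.inl hd
          · exact absurd hs h
          · have hm : x ∈ t := List.count_pos_iff.mp (by omega)
            exact Or.inr ⟨hm, Or.inl ((PySem.Set.mem_add seen x x).mpr (Or.inr rfl))⟩
      · have hcnt : (a :: t).count x = t.count x := by simp [Ne.symm hx]
        rw [hcnt, PySem.Set.mem_add]
        simp only [List.mem_cons, hx, false_or, or_false]

-- A's `seen` component is `seen.update xs`
theorem pdFold_seen (xs : List String) (seen dups : PySem.Set String) (res : List String) :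
    (xs.foldl pdStepA (seen, dups, res)).1 = PySem.Set.update seen xs := by
  induction xs generalizing seen dups res with
  | nil => simp [PySem.Set.update]
  | cons a t ih =>
    rw [PySem.Set.update_cons, List.foldl_cons]
    by_cases h : a ∈ seen
    · rw [pdStepA_mem _ _ h, ih, PySem.Set.add_of_mem h]
    · rw [pdStepA_not_mem _ _ h]; exact ih _ _ _

-- A's `result` component equals its `seen` component when they start equal
theorem pdFold_res_eq_seen (xs : List String) (seen dups : PySem.Set String) :
    (xs.foldl pdStepA (seen, dups, seen)).2.2 = (xs.foldl pdStepA (seen, dups, seen)).1 := by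
  induction xs generalizing seen dups with
  | nil => rfl
  | cons a t ih =>
    rw [List.foldl_cons]
    by_cases h : a ∈ seen
    · rw [pdStepA_mem _ _ h]; exact ih seen _
    · rw [pdStepA_not_mem _ _ h, PySem.Set.add_of_not_mem h]; exact ih (seen ++ [a]) dups

-- A's accumulated `duplicates` stays duplicate-free
theorem pdFold_dups_nodup (xs : List String) (seen dups : PySem.Set String) (res : List String)
    (hd : dups.Nodup) : (xs.foldl pdStepA (seen, dups, res)).2.1.Nodup := by
  induction xs generalizing seen dups res with
  | nil => exact hd
  | cons a t ih =>
    rw [List.foldl_cons]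
    by_cases h : a ∈ seen
    · rw [pdStepA_mem _ _ h]; exact ih _ _ _ (PySem.Set.nodup_add _ _ hd)
    · rw [pdStepA_not_mem _ _ h]; exact ih _ _ _ hd

-- B-side: the list of right components of adjacent equal pairs
def pdAdjEq (l : List String) : List String :=
  ((l.zip (l.drop 1)).filter (fun p => p.1 == p.2)).map Prod.snd

theorem pdAdjEq_nil : pdAdjEq [] = [] := rfl
theorem pdAdjEq_single (a : String) : pdAdjEq [a] = [] := rfl
theorem pdAdjEq_cons₂ (a b : String) (u : List String) :
    pdAdjEq (a :: b :: u) = (if a = b then [b] else []) ++ pdAdjEq (b :: u) := by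
  by_cases hab : a = b <;> simp [pdAdjEq, hab]

-- membership in pdAdjEq implies membership in the tail
theorem pdAdjEq_mem_drop (l : List String) (x : String) (h : x ∈ pdAdjEq l) : x ∈ l.drop 1 := by
  simp only [pdAdjEq, List.mem_map, List.mem_filter] at h
  obtain ⟨p, ⟨hz, _⟩, hp⟩ := h
  exact hp ▸ (List.of_mem_zip hz).2

-- on a sorted list, the adjacent equal pairs are exactly the values of count ≥ 2
theorem pdCount_cons_ne (x a : String) (l : List String) (h : x ≠ a) :
    (a :: l).count x = l.count x := by
  simp [Ne.symm h]

theorem pdAdjEq_mem_iff (l : List String) (hs : l.Pairwise (· ≤ ·)) (x : String) :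
    x ∈ pdAdjEq l ↔ 2 ≤ l.count x := by
  induction l with
  | nil => simp [pdAdjEq_nil]
  | cons a t ih =>
    cases t with
    | nil =>
      simp only [pdAdjEq_single, List.not_mem_nil, false_iff, not_le]
      have h1 : List.count x [a] ≤ 1 := by
        simpa using List.count_le_length (l := [a]) (a := x)
      omega
    | cons b u =>
      have hs' : (b :: u).Pairwise (· ≤ ·) := hs.of_cons
      have hab : a ≤ b := (List.pairwise_cons.mp hs).1 b List.mem_cons_self
      rw [pdAdjEq_cons₂]
      by_cases he : a = b
      · rw [if_pos he, List.singleton_append]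
        by_cases hx : x = b
        · subst hx
          have hc : 2 ≤ (a :: x :: u).count x := by
            rw [he]; simp
          simp [hc]
        · have hax : x ≠ a := fun h => hx (h.trans he)
          have h1 : (a :: b :: u).count x = (b :: u).count x := pdCount_cons_ne x a _ hax
          rw [h1, ← ih hs']
          simp [hx]
      · rw [if_neg he, List.nil_append]
        by_cases hx : x = a
        · have hlt : ∀ y ∈ b :: u, a < y := by
            intro y hy
            rcases List.mem_cons.mp hy with hy | hy
            · exact hy ▸ lt_of_le_of_ne hab he
            · exact lt_of_lt_of_le (lt_of_le_of_ne hab he)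
                ((List.pairwise_cons.mp hs').1 y hy)
          constructor
          · intro hm
            exfalso
            have hmem : x ∈ (b :: u).drop 1 := pdAdjEq_mem_drop _ _ hm
            have : x ∈ b :: u := List.mem_cons_of_mem b (by simpa using hmem)
            exact lt_irrefl a (hx ▸ hlt x this)
          · intro hc
            exfalso
            have h0 : (b :: u).count x = 0 :=
              List.count_eq_zero.mpr (fun hm => lt_irrefl a (hx ▸ hlt x hm))
            have h1 : (a :: b :: u).count x ≤ (b :: u).count x + 1 := by
              rw [List.count_cons]
              split <;> omega
            omega
        · rw [ih hs', pdCount_cons_ne x a _ hx]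

-- pairwise order of the adjacent-pair values on a sorted list
theorem pdAdjEq_pairwise (l : List String) (hs : l.Pairwise (· ≤ ·)) :
    (pdAdjEq l).Pairwise (· ≤ ·) := by
  induction l with
  | nil => simp [pdAdjEq_nil]
  | cons a t ih =>
    cases t with
    | nil => simp [pdAdjEq_single]
    | cons b u =>
      have hs' : (b :: u).Pairwise (· ≤ ·) := hs.of_cons
      rw [pdAdjEq_cons₂]
      by_cases he : a = b
      · rw [if_pos he, List.singleton_append]
        refine List.pairwise_cons.mpr ⟨?_, ih hs'⟩
        intro y hy
        exact (List.pairwise_cons.mp hs').1 y (by simpa using pdAdjEq_mem_drop _ _ hy)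
      · rw [if_neg he, List.nil_append]
        exact ih hs'

-- PySem.Set.ofList is a sublist (hence preserves Pairwise)
theorem pdOfList_sublist (l : List String) : (PySem.Set.ofList l).Sublist l := by
  induction l with
  | nil => simp [PySem.Set.ofList, PySem.Set.empty]
  | cons a t ih =>
    rw [PySem.Set.ofList_cons]
    exact List.Sublist.cons₂ a (List.Sublist.trans (by simp [PySem.Set.discard]) ih)

theorem pdDedup_pairwise_lt (l : List String) (hs : l.Pairwise (· ≤ ·)) :
    (PySem.List.dedup l).Pairwise (· < ·) := by
  have hsub := pdOfList_sublist l
  have hle : (PySem.Set.ofList l).Pairwise (· ≤ ·) := hs.sublist hsub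
  have hnd : (PySem.Set.ofList l).Nodup := PySem.Set.nodup_ofList l
  rw [PySem.List.dedup]
  exact (hnd.and hle).imp (fun h => lt_of_le_of_ne h.2 h.1)

-- ===== VERDICT (by name: the statement is the Claim_ definition above) =====
theorem process_duplicates_spec : Claim_equal_process_duplicates := by
  intro strings _
  unfold Spec_process_duplicates process_duplicates process_duplicates_alt
  simp only
  have hfst : (strings.foldl pdStepA (PySem.Set.empty, PySem.Set.empty, [])).2.2
      = PySem.List.dedup strings := by
    have h1 := pdFold_res_eq_seen strings PySem.Set.empty PySem.Set.empty
    have h2 := pdFold_seen strings PySem.Set.empty PySem.Set.empty PySem.Set.empty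
    simp only [PySem.Set.empty] at h1 h2 ⊢
    rw [h1, h2, PySem.List.dedup_eq_ofList, PySem.Set.update_nil_left]
  have hsortp : (PySem.List.sorted strings (fun x => x) false).Pairwise (· ≤ ·) :=
    PySem.List.sorted_pairwise strings (fun x => x)
  have hperm : (PySem.List.sorted strings (fun x => x) false).Perm strings :=
    PySem.List.sorted_perm strings (fun x => x) false
  set s := PySem.List.sorted strings (fun x => x) false with hsdef
  have hsnd : PySem.List.sorted (strings.foldl pdStepA (PySem.Set.empty, PySem.Set.empty, [])).2.1
        (fun x => x) false
      = PySem.List.dedup (pdAdjEq s) := by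
    apply PySem.List.sorted_eq_of_perm_of_pairwise_lt
    · apply (List.perm_ext_iff_of_nodup
        (by rw [PySem.List.dedup]; exact PySem.Set.nodup_ofList _)
        (pdFold_dups_nodup _ _ _ _ List.nodup_nil)).mpr
      intro x
      rw [PySem.List.dedup, PySem.Set.mem_ofList, pdAdjEq_mem_iff s hsortp,
        hperm.count_eq, pdFold_dups_mem]
      simp only [PySem.Set.empty, List.not_mem_nil, false_or]
      constructor
      · intro hc
        exact ⟨List.count_pos_iff.mp (by omega), hc⟩
      · rintro ⟨_, hc⟩
        exact hc
    · exact pdDedup_pairwise_lt _ (pdAdjEq_pairwise s hsortp)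
  rw [hfst, hsnd]
  rfl
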